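-- pv_equiv track=rewrite | github.com/KHUREKA/back | generate_seats.py | generate_seats_sql
-- ===== SOURCE A (Python) =====
-- def generate_seats_sql(zone_id, total_rows, total_cols, start_char='A'):
--     lines = []
--     lines.append(f"-- Zone {zone_id} ({total_rows}x{total_cols} = {total_rows*total_cols} seats)")
--     lines.append(f"INSERT INTO seats (seat_zone_id, row_label, seat_number, status, row_num, col_num, is_aisle, created_at, updated_at) VALUES")
--
--     values = []
--     for r in range(1, total_rows + 1):
--         row_label = chr(ord(start_char) + r - 1)
--         for c in range(1, total_cols + 1):
--             # Aisle if it's edge column, or if it's middle columns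
--             is_aisle = "true" if c in [1, total_cols, total_cols//2, total_cols//2 + 1] else "false"
--             val = f"({zone_id},'{row_label}','{c}','AVAILABLE',{r},{c},{is_aisle},NOW(),NOW())"
--             values.append(val)
--
--     # join with commas, 10 per line
--     for i in range(0, len(values), 5):
--         lines.append(",".join(values[i:i+5]) + ("," if i+5 < len(values) else ";"))
--
--     return "\n".join(lines)
-- ===== SOURCE B (Python) =====
-- def generate_seats_sql(zone_id, total_rows, total_cols, start_char='A'):
--     # Single streaming pass: each seat value is appended to a small line buffer
--     # that is flushed every 5 values (or at the final seat), instead of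
--     # materialising the full values list and re-chunking it by index slices.
--     total = total_rows * total_cols
--     out = [f"-- Zone {zone_id} ({total_rows}x{total_cols} = {total} seats)\n"
--            "INSERT INTO seats (seat_zone_id, row_label, seat_number, status, row_num, col_num, is_aisle, created_at, updated_at) VALUES"]
--     buf = []
--     n = 0
--     for r in range(1, total_rows + 1):
--         row_label = chr(ord(start_char) + r - 1)
--         for c in range(1, total_cols + 1):
--             n += 1
--             aisle = "true" if c in (1, total_cols, total_cols // 2, total_cols // 2 + 1) else "false"
--             buf.append(f"({zone_id},'{row_label}','{c}','AVAILABLE',{r},{c},{aisle},NOW(),NOW())")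
--             if len(buf) == 5 or n == total:
--                 out.append(",".join(buf) + ("," if n < total else ";"))
--                 buf = []
--     return "\n".join(out)
-- ===== Notes on version B (the rewrite author's own statement) =====
-- stated objective: alternative
-- what changed: B replaces A's two-phase collect-all-values-then-rechunk-by-index-slices pass with a single streaming pass that maintains a 5-value line buffer, flushing it (with ',' or, at the final seat, ';') as the seats are generated.
-- outside the precondition, e.g. on generate_seats_sql(1, 1114112, 1, 'A'): A raises ValueError, B raises ValueError; on generate_seats_sql(1, 1, 1, 'AB'): A raises TypeError, B raises TypeError
import Mathlib
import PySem

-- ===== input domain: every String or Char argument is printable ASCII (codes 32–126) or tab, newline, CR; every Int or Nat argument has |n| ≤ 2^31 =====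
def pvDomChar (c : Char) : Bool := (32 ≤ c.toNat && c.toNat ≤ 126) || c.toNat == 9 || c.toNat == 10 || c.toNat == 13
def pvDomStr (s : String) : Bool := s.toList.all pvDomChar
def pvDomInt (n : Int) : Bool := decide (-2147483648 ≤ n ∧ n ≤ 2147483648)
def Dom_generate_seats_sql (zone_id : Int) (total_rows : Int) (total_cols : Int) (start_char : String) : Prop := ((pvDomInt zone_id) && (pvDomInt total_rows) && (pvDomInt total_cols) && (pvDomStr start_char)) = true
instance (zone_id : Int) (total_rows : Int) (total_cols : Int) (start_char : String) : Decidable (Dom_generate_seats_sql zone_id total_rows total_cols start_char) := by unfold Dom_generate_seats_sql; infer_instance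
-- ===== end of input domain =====

-- B replaces A's collect-all-values-then-rechunk-by-index-slices pass with a single streaming
-- pass that flushes a 5-value line buffer on the fly (objective: alternative, same cost).

-- ===== PORT A =====
-- shared literal pieces: the two f-strings below are textually identical in Source A and Source B
def pvHdr1 (zone_id total_rows total_cols : Int) : String :=
  "-- Zone " ++ PySem.Int.toStr zone_id ++ " (" ++ PySem.Int.toStr total_rows ++ "x" ++
    PySem.Int.toStr total_cols ++ " = " ++ PySem.Int.toStr (total_rows * total_cols) ++ " seats)"
def pvHdr2 : String :=
  "INSERT INTO seats (seat_zone_id, row_label, seat_number, status, row_num, col_num, is_aisle, created_at, updated_at) VALUES"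
-- ord(start_char): exact when start_char has exactly one character (otherwise Python raises TypeError; Pre_ excludes that when the loop runs)
def pvOrd (s : String) : Int := match s.toList with | [c] => (c.toNat : Int) | _ => 0
-- chr(ord(start_char) + r - 1): exact for the code points Pre_ admits (valid non-surrogate scalar values)
def pvRowLabel (start_char : String) (r : Int) : Char := Char.ofNat (pvOrd start_char + r - 1).toNat
-- the seat-value f-string (identical in Source A and Source B); 'c in [1, total_cols, total_cols//2, total_cols//2+1]'
def pvSeatVal (zone_id total_cols : Int) (row_label : Char) (r c : Int) : String :=
  let is_aisle : String :=
    if c = 1 ∨ c = total_cols ∨ c = PySem.Int.floordiv total_cols 2 ∨ c = PySem.Int.floordiv total_cols 2 + 1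
    then "true" else "false"
  "(" ++ PySem.Int.toStr zone_id ++ ",'" ++ String.ofList [row_label] ++ "','" ++ PySem.Int.toStr c ++
    "','AVAILABLE'," ++ PySem.Int.toStr r ++ "," ++ PySem.Int.toStr c ++ "," ++ is_aisle ++ ",NOW(),NOW())"

def generate_seats_sql (zone_id : Int) (total_rows : Int) (total_cols : Int) (start_char : String) : String :=
  let lines : List String := [pvHdr1 zone_id total_rows total_cols, pvHdr2]
  let values : List String :=
    (PySem.List.pyRange 1 (total_rows + 1) 1).foldl (fun values r =>
      let row_label := pvRowLabel start_char r
      (PySem.List.pyRange 1 (total_cols + 1) 1).foldl (fun values c =>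
        values ++ [pvSeatVal zone_id total_cols row_label r c]) values) []
  let lines :=
    (PySem.List.pyRange 0 (PySem.List.len values) 5).foldl (fun lines i =>
      lines ++ [PySem.Str.join "," (PySem.List.slice values (some i) (some (i + 5))) ++
        (if i + 5 < PySem.List.len values then "," else ";")]) lines
  PySem.Str.join "\n" lines

-- ===== PORT B =====
-- the streaming loop body of Source B: append the value, flush the line buffer at 5 values or at the final seat
def pvStreamStep (total : Int) (st : List String × List String × Int) (v : String) : List String × List String × Int :=
  let n := st.2.2 + 1
  let buf := st.2.1 ++ [v]
  if buf.length = 5 ∨ n = total then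
    (st.1 ++ [PySem.Str.join "," buf ++ (if n < total then "," else ";")], [], n)
  else (st.1, buf, n)

def generate_seats_sql_alt (zone_id : Int) (total_rows : Int) (total_cols : Int) (start_char : String) : String :=
  let total := total_rows * total_cols
  let st : List String × List String × Int := ([pvHdr1 zone_id total_rows total_cols ++ "\n" ++ pvHdr2], [], 0)
  let st :=
    (PySem.List.pyRange 1 (total_rows + 1) 1).foldl (fun st r =>
      let row_label := pvRowLabel start_char r
      (PySem.List.pyRange 1 (total_cols + 1) 1).foldl (fun st c =>
        pvStreamStep total st (pvSeatVal zone_id total_cols row_label r c)) st) st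
  PySem.Str.join "\n" st.1

-- ===== PRECONDITION & SPEC =====
-- Pre_ excludes ONLY inputs on which A raises or whose returned value is not a Lean String:
-- when the row loop runs (total_rows ≥ 1), a start_char that is not exactly one character makes
-- ord() raise TypeError, a row label past 0x10FFFF makes chr() raise ValueError, and — only when
-- seats exist (total_cols ≥ 1) so the label reaches the output — a row label in the surrogate band
-- 0xD800–0xDFFF makes A return a Python string containing a lone UTF-16 surrogate, which is not a
-- Unicode scalar value and hence not a value of the Lean type String (Python B returns the identical
-- string there); every input whose output is a representable string is admitted.
def Pre_generate_seats_sql (zone_id : Int) (total_rows : Int) (total_cols : Int) (start_char : String) : Prop :=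
  total_rows < 1 ∨
    (start_char.toList.length = 1 ∧
      start_char.toList.all (fun c => decide
        ((c.toNat : Int) + total_rows - 1 ≤ 1114111 ∧
          (total_cols < 1 ∨ (c.toNat : Int) + total_rows - 1 < 55296 ∨ 57343 < (c.toNat : Int)))) = true)
instance (zone_id : Int) (total_rows : Int) (total_cols : Int) (start_char : String) : Decidable (Pre_generate_seats_sql zone_id total_rows total_cols start_char) := by unfold Pre_generate_seats_sql; infer_instance
def pvWitness_generate_seats_sql : Int × Int × Int × String := (1, 3, 4, "A")
def Spec_generate_seats_sql (zone_id : Int) (total_rows : Int) (total_cols : Int) (start_char : String) (out : String) : Prop := out = generate_seats_sql_alt zone_id total_rows total_cols start_char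
instance (zone_id : Int) (total_rows : Int) (total_cols : Int) (start_char : String) (out : String) : Decidable (Spec_generate_seats_sql zone_id total_rows total_cols start_char out) := by unfold Spec_generate_seats_sql; infer_instance

-- ===== CLAIM (what is proved, stated in full; the proofs are below) =====
def Claim_equal_generate_seats_sql : Prop := ∀ (zone_id : Int) (total_rows : Int) (total_cols : Int) (start_char : String), Dom_generate_seats_sql zone_id total_rows total_cols start_char → Pre_generate_seats_sql zone_id total_rows total_cols start_char → Spec_generate_seats_sql zone_id total_rows total_cols start_char (generate_seats_sql zone_id total_rows total_cols start_char)

-- ===== LEMMAS AND PROOFS =====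

-- the flat list of seat-value strings both Pythons generate, row-major
def pvV (zone_id total_rows total_cols : Int) (start_char : String) : List String :=
  (PySem.List.pyRange 1 (total_rows + 1) 1).flatMap (fun r =>
    (PySem.List.pyRange 1 (total_cols + 1) 1).map (fun c =>
      pvSeatVal zone_id total_cols (pvRowLabel start_char r) r c))

-- the lines both programs make out of the seat values: 5 per line, ',' between lines, ';' at the end
def pvChunkLines : List String → List String
  | [] => []
  | v :: vs =>
    (PySem.Str.join "," ((v :: vs).take 5) ++ (if 5 < (v :: vs).length then "," else ";"))
      :: pvChunkLines ((v :: vs).drop 5)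
termination_by l => l.length
decreasing_by simp

@[simp] theorem pvChunkLines_nil : pvChunkLines [] = [] := by rw [pvChunkLines.eq_def]

theorem pvChunkLines_cons (v : String) (vs : List String) :
    pvChunkLines (v :: vs) =
      (PySem.Str.join "," ((v :: vs).take 5) ++ (if 5 < (v :: vs).length then "," else ";"))
        :: pvChunkLines ((v :: vs).drop 5) := by
  rw [pvChunkLines.eq_def]

theorem pvStreamStep_eq (total : Int) (out buf : List String) (n : Int) (v : String) :
    pvStreamStep total (out, buf, n) v =
      if (buf ++ [v]).length = 5 ∨ n + 1 = total
      then (out ++ [PySem.Str.join "," (buf ++ [v]) ++ (if n + 1 < total then "," else ";")], [], n + 1)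
      else (out, buf ++ [v], n + 1) := rfl

theorem pv_values_eq (zone_id total_rows total_cols : Int) (start_char : String) :
    (PySem.List.pyRange 1 (total_rows + 1) 1).foldl (fun values r =>
      (PySem.List.pyRange 1 (total_cols + 1) 1).foldl (fun values c =>
        values ++ [pvSeatVal zone_id total_cols (pvRowLabel start_char r) r c]) values) []
    = pvV zone_id total_rows total_cols start_char := by
  unfold pvV
  simp only [PySem.List.foldl_append_singleton_eq_map, PySem.List.foldl_append_eq_flatMap]
  simp

theorem pvRange5_nil {a b : Int} (h : b ≤ a) : PySem.List.pyRange a b 5 = [] := by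
  rw [PySem.List.pyRange_of_pos a b (by norm_num)]
  simp [show ¬ a < b by omega]

theorem pvRange5_cons {a b : Int} (h : a < b) :
    PySem.List.pyRange a b 5 = a :: PySem.List.pyRange (a + 5) b 5 := by
  rw [PySem.List.pyRange_of_pos a b (by norm_num), PySem.List.pyRange_of_pos (a + 5) b (by norm_num)]
  by_cases h5 : a + 5 < b
  · rw [if_pos h, if_pos h5]
    rw [show ((b - a + 5 - 1) / 5).toNat = ((b - (a + 5) + 5 - 1) / 5).toNat + 1 by omega,
      List.range_succ_eq_map, List.map_cons, List.map_map]
    refine congrArg₂ List.cons (by norm_num) (List.map_congr_left fun k _ => ?_)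
    simp [Function.comp]
    ring
  · rw [if_pos h, if_neg h5]
    rw [show ((b - a + 5 - 1) / 5).toNat = 1 by omega]
    simp

theorem pv_chunk_eq (fuel : Nat) : ∀ (V : List String) (j : Nat) (acc : List String),
    V.length - j ≤ fuel →
    (PySem.List.pyRange (j : Int) ((V.length : Nat) : Int) 5).foldl (fun lines i =>
      lines ++ [PySem.Str.join "," (PySem.List.slice V (some i) (some (i + 5))) ++
        (if i + 5 < ((V.length : Nat) : Int) then "," else ";")]) acc
    = acc ++ pvChunkLines (V.drop j) := by
  induction fuel with
  | zero =>
    intro V j acc h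
    have hj : V.length ≤ j := by omega
    rw [pvRange5_nil (by exact_mod_cast hj), List.drop_eq_nil_of_le hj]
    simp
  | succ fuel ih =>
    intro V j acc h
    by_cases hj : j < V.length
    · rw [pvRange5_cons (by exact_mod_cast hj), List.foldl_cons]
      have hslice : PySem.List.slice V (some (j : Int)) (some ((j : Int) + 5)) = (V.drop j).take 5 := by
        rw [PySem.List.slice_toNat V (by positivity) (by positivity)]
        congr 1
        omega
      have hsep : ((j : Int) + 5 < ((V.length : Nat) : Int)) ↔ 5 < (V.drop j).length := by
        simp
        omega
      have hrec := ih V (j + 5) (acc ++ [PySem.Str.join "," ((V.drop j).take 5) ++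
        (if 5 < (V.drop j).length then "," else ";")]) (by omega)
      rw [hslice]
      have hcast : (j : Int) + 5 = ((j + 5 : Nat) : Int) := by push_cast; ring
      rw [show (if (j : Int) + 5 < ((V.length : Nat) : Int) then "," else ";")
            = (if 5 < (V.drop j).length then "," else ";") by
          by_cases h5 : 5 < (V.drop j).length
          · rw [if_pos (hsep.mpr h5), if_pos h5]
          · rw [if_neg (fun hc => h5 (hsep.mp hc)), if_neg h5]]
      rw [hcast, hrec]
      have hne : V.drop j ≠ [] := by
        intro hnil
        have := List.drop_eq_nil_iff.mp hnil
        omega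
      obtain ⟨w, ws, hw⟩ := List.exists_cons_of_ne_nil hne
      rw [show V.drop (j + 5) = (V.drop j).drop 5 by rw [List.drop_drop]]
      rw [hw, pvChunkLines_cons, ← hw]
      simp
    · rw [pvRange5_nil (by exact_mod_cast (by omega : (V.length : Nat) ≤ j)),
        List.drop_eq_nil_of_le (by omega)]
      simp

theorem pv_foldl_flatMap {α β σ : Type} (step : σ → β → σ) (g : α → List β) (l : List α) (s : σ) :
    l.foldl (fun s x => (g x).foldl step s) s = (l.flatMap g).foldl step s := by
  induction l generalizing s with
  | nil => rfl
  | cons x xs ih => simp [List.foldl_append, ih]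

theorem pvB_fold_eq (zone_id total_rows total_cols total : Int) (start_char : String)
    (st : List String × List String × Int) :
    (PySem.List.pyRange 1 (total_rows + 1) 1).foldl (fun st r =>
      (PySem.List.pyRange 1 (total_cols + 1) 1).foldl (fun st c =>
        pvStreamStep total st (pvSeatVal zone_id total_cols (pvRowLabel start_char r) r c)) st) st
    = (pvV zone_id total_rows total_cols start_char).foldl (pvStreamStep total) st := by
  unfold pvV
  rw [← pv_foldl_flatMap]
  simp only [List.foldl_map]

theorem pv_noflush (W : List String) : ∀ (out buf : List String) (n total : Int),
    buf.length + W.length < 5 → n + W.length < total →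
    W.foldl (pvStreamStep total) (out, buf, n) = (out, buf ++ W, n + W.length) := by
  induction W with
  | nil => intro out buf n total _ _; simp
  | cons w ws ih =>
    intro out buf n total h1 h2
    have h1' : buf.length + (ws.length + 1) < 5 := by simpa using h1
    have h2' : n + ((ws.length : Int) + 1) < total := by
      simp only [List.length_cons] at h2
      push_cast at h2
      omega
    simp only [List.foldl_cons]
    have hcond : ¬(((buf ++ [w]).length = 5) ∨ (n + 1 = total)) := by
      simp only [List.length_append, List.length_cons, List.length_nil, not_or]
      constructor
      · omega
      · omega
    rw [pvStreamStep_eq, if_neg hcond]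
    rw [ih out (buf ++ [w]) (n + 1) total (by simp; omega) (by omega)]
    simp
    omega

theorem pv_stream (fuel : Nat) : ∀ (V : List String) (out : List String) (j : Nat),
    V.length ≤ fuel →
    V.foldl (pvStreamStep (((j + V.length : Nat)) : Int)) (out, [], (j : Int))
      = (out ++ pvChunkLines V, [], ((j + V.length : Nat) : Int)) := by
  induction fuel with
  | zero =>
    intro V out j h
    have hnil : V = [] := List.length_eq_zero_iff.mp (by omega)
    subst hnil
    simp
  | succ fuel ih =>
    intro V out j hf
    by_cases hVnil : V = []
    · subst hVnil
      simp
    set L := V.length with hLdef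
    have hL1 : 1 ≤ L := by
      have := List.length_pos_of_ne_nil hVnil
      omega
    set m := min 5 L with hmdef
    obtain ⟨k, hk⟩ : ∃ k, m = k + 1 := ⟨m - 1, by omega⟩
    have hmL : m ≤ L := by omega
    have hm5 : m ≤ 5 := by omega
    have hkL : k < V.length := by omega
    have htakem : V.take m = V.take k ++ [V[k]] := by
      rw [hk, List.take_add_one, List.getElem?_eq_getElem hkL]
      rfl
    have hlentake : (V.take k).length = k := by
      rw [List.length_take]
      omega
    conv_lhs => rw [show V = V.take m ++ V.drop m from (List.take_append_drop m V).symm]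
    rw [List.foldl_append, htakem, List.foldl_append]
    rw [pv_noflush (V.take k) out [] (j : Int) _ (by simp [hlentake]; omega)
      (by rw [hlentake]; push_cast; omega)]
    simp only [List.foldl_cons, List.foldl_nil, List.nil_append, hlentake]
    rw [pvStreamStep_eq]
    have hlen5 : (V.take k ++ [V[k]]).length = m := by
      rw [← htakem, List.length_take]
      omega
    rw [if_pos (by
      rcases Nat.lt_or_ge L 5 with h5 | h5
      · right
        push_cast
        omega
      · left
        rw [hlen5]
        omega)]
    have htk5 : V.take m = V.take 5 := by
      rcases Nat.lt_or_ge L 5 with h5 | h5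
      · rw [List.take_of_length_le (by omega), List.take_of_length_le (by omega)]
      · rw [show m = 5 by omega]
    have hsep : ((j : Int) + (k : Int) + 1 < ((j + L : Nat) : Int)) ↔ 5 < L := by
      push_cast
      omega
    rw [← htakem, htk5]
    simp only [hsep]
    have hdropm : V.drop m = V.drop 5 := by
      rcases Nat.lt_or_ge L 5 with h5 | h5
      · rw [List.drop_eq_nil_of_le (by omega), List.drop_eq_nil_of_le (by omega)]
      · rw [show m = 5 by omega]
    have hrec := ih (V.drop m) (out ++ [PySem.Str.join "," (V.take 5) ++ (if 5 < L then "," else ";")])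
      (j + m) (by rw [List.length_drop]; omega)
    rw [show ((j + m) + (V.drop m).length : Nat) = j + L by rw [List.length_drop]; omega] at hrec
    rw [show (j : Int) + (k : Int) + 1 = (((j + m : Nat)) : Int) by push_cast; omega]
    rw [hrec]
    obtain ⟨w, ws, hw⟩ := List.exists_cons_of_ne_nil hVnil
    rw [hw, pvChunkLines_cons, ← hw, hdropm]
    simp [← hLdef]

theorem pv_join_glue (h1 h2 : String) (rest : List String) :
    PySem.Str.join "\n" (h1 :: h2 :: rest) = PySem.Str.join "\n" ((h1 ++ "\n" ++ h2) :: rest) := by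
  apply String.toList_inj.mp
  rw [PySem.Str.toList_join, PySem.Str.toList_join]
  rcases rest with _ | ⟨q, qs⟩
  · simp [PySem.Chars.join_cons_cons, PySem.Chars.join_singleton]
  · simp only [List.map_cons, PySem.Chars.join_cons_cons, String.toList_append]
    simp [List.append_assoc]

theorem pvV_nil (zone_id total_rows total_cols : Int) (start_char : String)
    (h : total_rows < 1 ∨ total_cols < 1) : pvV zone_id total_rows total_cols start_char = [] := by
  unfold pvV
  rcases h with h | h
  · rw [show PySem.List.pyRange 1 (total_rows + 1) 1 = [] from PySem.List.pyRange_one_eq_nil (by omega)]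
    rfl
  · have hcols : PySem.List.pyRange 1 (total_cols + 1) 1 = [] := PySem.List.pyRange_one_eq_nil (by omega)
    simp [hcols]

theorem pvV_length (zone_id total_rows total_cols : Int) (start_char : String)
    (hr : 1 ≤ total_rows) (hc : 1 ≤ total_cols) :
    ((pvV zone_id total_rows total_cols start_char).length : Int) = total_rows * total_cols := by
  unfold pvV
  rw [List.length_flatMap]
  have hmap : ∀ r ∈ PySem.List.pyRange 1 (total_rows + 1) 1,
      ((PySem.List.pyRange 1 (total_cols + 1) 1).map (fun c =>
        pvSeatVal zone_id total_cols (pvRowLabel start_char r) r c)).length = (total_cols + 1 - 1).toNat := by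
    intro r _
    rw [List.length_map, PySem.List.length_pyRange_one]
  rw [List.map_congr_left hmap, List.map_const', List.sum_replicate, smul_eq_mul,
    PySem.List.length_pyRange_one]
  push_cast
  rw [show (((total_rows + 1 - 1).toNat : Nat) : Int) = total_rows by omega,
    show (((total_cols + 1 - 1).toNat : Nat) : Int) = total_cols by omega]

-- ===== VERDICT (by name: the statement is the Claim_ definition above) =====
theorem generate_seats_sql_spec : Claim_equal_generate_seats_sql := by
  intro zone_id total_rows total_cols start_char _ _
  unfold Spec_generate_seats_sql generate_seats_sql generate_seats_sql_alt
  simp only [pv_values_eq, PySem.List.len_eq, pvB_fold_eq]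
  have hchunk := pv_chunk_eq (pvV zone_id total_rows total_cols start_char).length
    (pvV zone_id total_rows total_cols start_char) 0
    [pvHdr1 zone_id total_rows total_cols, pvHdr2] (by omega)
  simp only [Nat.cast_zero, List.drop_zero] at hchunk
  rw [hchunk]
  by_cases hpos : 1 ≤ total_rows ∧ 1 ≤ total_cols
  · have hlen := pvV_length zone_id total_rows total_cols start_char hpos.1 hpos.2
    have hstream := pv_stream (pvV zone_id total_rows total_cols start_char).length
      (pvV zone_id total_rows total_cols start_char)
      [pvHdr1 zone_id total_rows total_cols ++ "\n" ++ pvHdr2] 0 (le_refl _)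
    simp only [Nat.zero_add, Nat.cast_zero] at hstream
    rw [show total_rows * total_cols = (((pvV zone_id total_rows total_cols start_char).length : Nat) : Int) from hlen.symm]
    rw [hstream]
    have hglue := pv_join_glue (pvHdr1 zone_id total_rows total_cols) pvHdr2
      (pvChunkLines (pvV zone_id total_rows total_cols start_char))
    simpa using hglue
  · have hnil := pvV_nil zone_id total_rows total_cols start_char (by omega)
    rw [hnil]
    simp
    exact pv_join_glue (pvHdr1 zone_id total_rows total_cols) pvHdr2 []
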